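-- pv_equiv track=rewrite | github.com/empire1999/stx | stxmap_market_repeat_num.py | check_repeat_num
-- ===== SOURCE A (Python) =====
-- def check_repeat_num(map_str) :
-- 	repeat_str = ""
-- 	cnt = 1
-- 	lt_list = list(map_str)
-- 	lt = lt_list[0]
-- 	i = 1
-- 	while i < len(lt_list) :
-- 		if lt == lt_list[i] :
-- 			cnt += 1
-- 		else :
-- 			lt = lt_list[i]
-- 			cnt = 1
--
-- 		if cnt == 3 :
-- 			repeat_str += "[3]"
-- 		elif cnt == 4 :
-- 			repeat_str += "[4]"
-- 		elif cnt == 5 :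
-- 			repeat_str += "[5]"
-- 		elif cnt == 6 :
-- 			repeat_str += "[6]"
--
-- 		i += 1
--
-- 	return repeat_str
-- ===== SOURCE B (Python) =====
-- def check_repeat_num(map_str):
--     runs = []
--     for c in map_str:
--         if runs and runs[-1][0] == c:
--             runs[-1] = (runs[-1][0], runs[-1][1] + 1)
--         else:
--             runs.append((c, 1))
--     return "".join("[" + str(n) + "]"
--                    for _, L in runs
--                    for n in range(3, min(L, 6) + 1))
-- ===== Notes on version B (the rewrite author's own statement) =====
-- stated objective: alternative
-- what changed: B run-length-encodes the string into (char, length) runs and emits the [3]..[6] markers per run via a closed-form range(3, min(L,6)+1), instead of A's single scan with a running counter and an if/elif marker chain.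
import Mathlib
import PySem

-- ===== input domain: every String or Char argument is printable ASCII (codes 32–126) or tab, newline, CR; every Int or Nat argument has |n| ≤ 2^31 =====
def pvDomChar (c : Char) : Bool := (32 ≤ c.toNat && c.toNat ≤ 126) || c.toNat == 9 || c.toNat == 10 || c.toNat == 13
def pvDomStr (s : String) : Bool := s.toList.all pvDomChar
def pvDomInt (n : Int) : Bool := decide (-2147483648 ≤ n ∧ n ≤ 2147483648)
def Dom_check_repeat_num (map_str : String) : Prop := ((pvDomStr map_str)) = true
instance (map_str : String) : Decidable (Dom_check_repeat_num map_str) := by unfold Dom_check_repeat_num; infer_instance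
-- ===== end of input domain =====

-- B: run-length encoding + closed-form markers per run (alternative decomposition); return value proved equal to A's on all nonempty strings (A raises IndexError on "").

-- ===== PORT A =====
-- the while loop over lt_list[1:], state (lt, cnt, repeat_str)
def pvALoop (lt : Char) (cnt : Int) (acc : String) : List Char → String
  | [] => acc
  | c :: rest =>
    let p := if lt = c then (lt, cnt + 1) else (c, 1)
    let acc' := if p.2 = 3 then acc ++ "[3]"
      else if p.2 = 4 then acc ++ "[4]"
      else if p.2 = 5 then acc ++ "[5]"
      else if p.2 = 6 then acc ++ "[6]"
      else acc
    pvALoop p.1 p.2 acc' rest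

def check_repeat_num (map_str : String) : String :=
  match PySem.List.pyGet? map_str.toList 0 with
  | none => ""   -- lt_list[0] raises IndexError in Python; excluded by Pre_
  | some lt => pvALoop lt 1 "" (map_str.toList.drop 1)

-- ===== PORT B =====
-- one step of the run-length encoding loop (runs[-1] inspection / update)
def pvBStep (runs : List (Char × Int)) (c : Char) : List (Char × Int) :=
  match runs.getLast? with
  | some (c0, L) => if c0 = c then runs.dropLast ++ [(c0, L + 1)] else runs ++ [(c, 1)]
  | none => [(c, 1)]

-- "[" + str(n) + "]" for n in range(3, min(L, 6) + 1)
def pvRunMarks (L : Int) : String :=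
  String.join ((PySem.List.pyRange 3 (min L 6 + 1) 1).map (fun n => "[" ++ PySem.Int.toStr n ++ "]"))

def check_repeat_num_alt (map_str : String) : String :=
  String.join ((map_str.toList.foldl pvBStep []).map (fun r => pvRunMarks r.2))

-- ===== PRECONDITION & SPEC =====
-- Pre_ excludes exactly the empty string, on which A raises IndexError.
def Pre_check_repeat_num (map_str : String) : Prop := map_str ≠ ""
instance (map_str : String) : Decidable (Pre_check_repeat_num map_str) := by unfold Pre_check_repeat_num; infer_instance
def pvWitness_check_repeat_num : String := "aaab"

def Spec_check_repeat_num (map_str : String) (out : String) : Prop := out = check_repeat_num_alt map_str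
instance (map_str : String) (out : String) : Decidable (Spec_check_repeat_num map_str out) := by unfold Spec_check_repeat_num; infer_instance

-- ===== CLAIM (what is proved, stated in full; the proofs are below) =====
def Claim_equal_check_repeat_num : Prop := ∀ (map_str : String), Dom_check_repeat_num map_str → Pre_check_repeat_num map_str → Spec_check_repeat_num map_str (check_repeat_num map_str)

-- ===== LEMMAS AND PROOFS =====

-- the marker A appends when the counter reaches m
def pvMark (m : Int) : String :=
  if m = 3 then "[3]" else if m = 4 then "[4]" else if m = 5 then "[5]" else if m = 6 then "[6]" else ""

-- A's loop with the accumulator dropped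
def pvTailM (lt : Char) (cnt : Int) : List Char → String
  | [] => ""
  | c :: rest =>
    let p := if lt = c then (lt, cnt + 1) else (c, 1)
    pvMark p.2 ++ pvTailM p.1 p.2 rest

-- run-length encoding written as plain recursion (proof-side model of B's fold)
def pvRle (c : Char) (n : Int) : List Char → List (Char × Int)
  | [] => [(c, n)]
  | d :: ds => if c = d then pvRle c (n + 1) ds else (c, n) :: pvRle d 1 ds

def pvFlat (rs : List (Char × Int)) : String :=
  String.join (rs.map (fun r => pvRunMarks r.2))

-- markers still to come for a run of total length L when the counter already stands at a
def pvPart (a L : Int) : String :=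
  String.join ((PySem.List.pyRange (max (a + 1) 3) (min L 6 + 1) 1).map (fun n => "[" ++ PySem.Int.toStr n ++ "]"))


-- string-join bookkeeping
lemma pvFoldl_str (l : List String) : ∀ (a b : String),
    l.foldl (· ++ ·) (a ++ b) = a ++ l.foldl (· ++ ·) b := by
  induction l with
  | nil => intro a b; rfl
  | cons x xs ih => intro a b; simpa [String.append_assoc] using ih a (b ++ x)

lemma pvJoin_cons (a : String) (l : List String) :
    String.join (a :: l) = a ++ String.join l := by
  have h := pvFoldl_str l a ""
  simpa [String.join, List.foldl] using h

-- A's accumulator threaded out of the loop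
lemma pvALoop_acc (ds : List Char) : ∀ (lt : Char) (cnt : Int) (acc : String),
    pvALoop lt cnt acc ds = acc ++ pvTailM lt cnt ds := by
  induction ds with
  | nil => intro lt cnt acc; simp [pvALoop, pvTailM]
  | cons c rest ih =>
    intro lt cnt acc
    simp only [pvALoop, pvTailM, pvMark]
    split_ifs <;> simp [ih, String.append_assoc]

-- one fold step of B, seen on a nonempty runs list
lemma pvBStep_concat (pre : List (Char × Int)) (c0 : Char) (n : Int) (c : Char) :
    pvBStep (pre ++ [(c0, n)]) c =
      if c0 = c then pre ++ [(c0, n + 1)] else (pre ++ [(c0, n)]) ++ [(c, 1)] := by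
  simp [pvBStep]

-- B's fold computes the plain-recursion run-length encoding
lemma pvFoldl_rle (ds : List Char) : ∀ (pre : List (Char × Int)) (c : Char) (n : Int),
    ds.foldl pvBStep (pre ++ [(c, n)]) = pre ++ pvRle c n ds := by
  induction ds with
  | nil => intro pre c n; simp [pvRle]
  | cons d ds ih =>
    intro pre c n
    simp only [List.foldl, pvBStep_concat, pvRle]
    by_cases h : c = d
    · simp [h, ih]
    · simp only [h, if_false]
      rw [List.append_assoc]
      simpa using ih (pre ++ [(c, n)]) d 1

-- the head run of the encoding carries the starting character, length ≥ current count
lemma pvRle_head (ds : List Char) : ∀ (c : Char) (n : Int),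
    ∃ L rs, pvRle c n ds = (c, L) :: rs ∧ n ≤ L := by
  induction ds with
  | nil => intro c n; exact ⟨n, [], rfl, le_refl n⟩
  | cons d ds ih =>
    intro c n
    by_cases h : c = d
    · subst h
      obtain ⟨L, rs, hrle, hle⟩ := ih c (n + 1)
      exact ⟨L, rs, by simp [pvRle, hrle], by omega⟩
    · exact ⟨n, pvRle d 1 ds, by simp [pvRle, h], le_refl n⟩

lemma pvPart_end (a L : Int) (h : L ≤ a) : pvPart a L = "" := by
  unfold pvPart
  rw [PySem.List.pyRange_one_eq_nil (by omega)]
  rfl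

lemma pvMark_small (m : Int) (h : m < 3) : pvMark m = "" := by
  unfold pvMark; split_ifs <;> first | rfl | omega

lemma pvMark_big (m : Int) (h : 6 < m) : pvMark m = "" := by
  unfold pvMark; split_ifs <;> first | rfl | omega

lemma pvMark_fmt (m : Int) (h3 : 3 ≤ m) (h6 : m ≤ 6) :
    ("[" ++ PySem.Int.toStr m ++ "]" : String) = pvMark m := by
  have : m = 3 ∨ m = 4 ∨ m = 5 ∨ m = 6 := by omega
  rcases this with h | h | h | h <;> subst h <;> decide

-- peeling one counter increment off the remaining markers of a run
lemma pvPart_step (n L : Int) (h0 : 0 ≤ n) (hL : n + 1 ≤ L) :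
    pvPart n L = pvMark (n + 1) ++ pvPart (n + 1) L := by
  by_cases hlow : n + 1 < 3
  · have hmax : max (n + 1) 3 = max (n + 1 + 1) 3 := by omega
    rw [pvMark_small _ hlow]
    unfold pvPart
    rw [hmax]
    simp
  · by_cases hhigh : 6 < n + 1
    · rw [pvMark_big _ hhigh]
      unfold pvPart
      rw [PySem.List.pyRange_one_eq_nil (by omega), PySem.List.pyRange_one_eq_nil (by omega)]
      simp
    · -- 3 ≤ n+1 ≤ 6 ≤ ... : the range starts exactly at n+1
      have h3 : 3 ≤ n + 1 := by omega
      have h6 : n + 1 ≤ 6 := by omega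
      have hs1 : max (n + 1) 3 = n + 1 := by omega
      have hs2 : max (n + 1 + 1) 3 = n + 1 + 1 := by omega
      unfold pvPart
      rw [hs1, hs2, PySem.List.pyRange_one_cons (by omega)]
      rw [List.map_cons, pvJoin_cons, pvMark_fmt _ h3 h6]

-- A's markerless loop equals the per-run closed forms over the encoding
lemma pvTailM_rle (ds : List Char) : ∀ (c : Char) (n : Int), 1 ≤ n →
    ∀ (L : Int) (rs : List (Char × Int)), pvRle c n ds = (c, L) :: rs →
    pvTailM c n ds = pvPart n L ++ pvFlat rs := by
  induction ds with
  | nil =>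
    intro c n hn L rs h
    simp only [pvRle, List.cons.injEq, Prod.mk.injEq] at h
    obtain ⟨⟨-, hL⟩, hrs⟩ := h
    subst hL; subst hrs
    simp [pvTailM, pvPart_end n n le_rfl, pvFlat, String.join]
  | cons d ds ih =>
    intro c n hn L rs h
    by_cases hcd : c = d
    · subst hcd
      simp only [pvRle, if_true] at h
      have hrec := ih c (n + 1) (by omega) L rs h
      obtain ⟨L', rs', hrle, hle⟩ := pvRle_head ds c (n + 1)
      rw [h] at hrle
      injection hrle with h1 h2
      injection h1 with h1a h1b
      have hleL : n + 1 ≤ L := by omega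
      simp only [pvTailM, if_true]
      rw [hrec, pvPart_step n L (by omega) hleL, String.append_assoc]
    · simp only [pvRle, if_neg hcd, List.cons.injEq, Prod.mk.injEq] at h
      obtain ⟨⟨-, hL⟩, hrs⟩ := h
      subst hL; subst hrs
      simp only [pvTailM, if_neg hcd]
      obtain ⟨L', rs', hrle, hle⟩ := pvRle_head ds d 1
      have hrec := ih d 1 le_rfl L' rs' hrle
      rw [hrec, pvMark_small 1 (by omega), pvPart_end n n le_rfl]
      simp only [pvFlat, hrle, List.map_cons, pvJoin_cons]
      have hp : pvRunMarks L' = pvPart 1 L' := by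
        unfold pvRunMarks pvPart; norm_num
      rw [hp]

-- ===== VERDICT (by name: the statement is the Claim_ definition above) =====
theorem check_repeat_num_spec : Claim_equal_check_repeat_num := by
  intro map_str _ hpre
  unfold Spec_check_repeat_num check_repeat_num check_repeat_num_alt
  have hne : map_str.toList ≠ [] := by
    intro h
    exact hpre (by rwa [String.toList_eq_nil_iff] at h)
  obtain ⟨c, cs, hcs⟩ := List.exists_cons_of_ne_nil hne
  rw [hcs]
  obtain ⟨L, rs, hrle, hle⟩ := pvRle_head cs c 1
  have hB : (c :: cs).foldl pvBStep ([] : List (Char × Int)) = pvRle c 1 cs := by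
    have := pvFoldl_rle cs [] c 1
    simpa [List.foldl, pvBStep] using this
  have hget : PySem.List.pyGet? (c :: cs) 0 = some c := by
    simp [PySem.List.pyGet?, PySem.List.pyIdx?]
  rw [hget]
  simp only [List.drop_one, List.tail_cons]
  rw [pvALoop_acc, pvTailM_rle cs c 1 le_rfl L rs hrle, hB, hrle]
  simp only [List.map_cons, pvJoin_cons]
  have hp : pvRunMarks L = pvPart 1 L := by unfold pvRunMarks pvPart; norm_num
  simp [pvFlat, hp]
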